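-- pv_equiv track=rewrite | github.com/nayaraoa/pne-studentslab | S06/Seq1.py | generate_seqs
-- ===== SOURCE A (Python) =====
-- def generate_seqs(pattern, number):
--     seq_list = []
--     for i in range(0, number):
--         if i == 0:
--             seq_list.append(pattern)
--         else:
--             seq_list.append(pattern + seq_list[i-1])
--     return seq_list
-- ===== SOURCE B (Python) =====
-- def generate_seqs(pattern, number):
--     return [pattern * (i + 1) for i in range(number)]
-- ===== Notes on version B (the rewrite author's own statement) =====
-- stated objective: simpler
-- what changed: Replaced the accumulator-threading loop (each element built by concatenating pattern onto the previous list element) with a direct list comprehension computing each element independently as pattern*(i+1) by string repetition.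
import Mathlib
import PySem

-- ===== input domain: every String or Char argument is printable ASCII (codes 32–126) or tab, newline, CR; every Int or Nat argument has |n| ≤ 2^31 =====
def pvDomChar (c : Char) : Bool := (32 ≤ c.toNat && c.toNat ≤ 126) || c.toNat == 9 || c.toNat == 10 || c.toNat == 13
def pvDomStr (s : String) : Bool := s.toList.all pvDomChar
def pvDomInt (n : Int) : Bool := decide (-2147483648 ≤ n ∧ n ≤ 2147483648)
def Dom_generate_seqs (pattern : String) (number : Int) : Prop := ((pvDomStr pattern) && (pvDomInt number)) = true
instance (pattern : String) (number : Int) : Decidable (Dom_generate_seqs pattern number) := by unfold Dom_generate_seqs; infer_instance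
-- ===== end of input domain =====

-- B replaces A's accumulator loop (element i = pattern + previous element) with a direct
-- comprehension building element i independently as pattern*(i+1); simpler, same cost.

-- ===== PORT A =====
-- A: seq_list = []; for i in range(0, number): append pattern if i == 0 else pattern + seq_list[i-1]
def generate_seqs (pattern : String) (number : Int) : List String :=
  (PySem.List.pyRange 0 number 1).foldl
    (fun seq_list i =>
      if i == 0 then seq_list ++ [pattern]
      else seq_list ++
        [String.ofList (pattern.toList ++ ((PySem.List.pyGet? seq_list (i - 1)).getD "").toList)])
    []

-- ===== PORT B =====
-- pattern * (i+1)  (Python string repetition)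
def pvStrMul (pattern : String) (n : Int) : String :=
  String.ofList (List.replicate n.toNat pattern.toList).flatten

-- B: [pattern * (i + 1) for i in range(number)]
def generate_seqs_alt (pattern : String) (number : Int) : List String :=
  (PySem.List.pyRange 0 number 1).map (fun i => pvStrMul pattern (i + 1))

-- ===== PRECONDITION & SPEC =====
def Spec_generate_seqs (pattern : String) (number : Int) (out : List String) : Prop := out = generate_seqs_alt pattern number
instance (pattern : String) (number : Int) (out : List String) : Decidable (Spec_generate_seqs pattern number out) := by unfold Spec_generate_seqs; infer_instance

-- ===== CLAIM (what is proved, stated in full; the proofs are below) =====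
def Claim_equal_generate_seqs : Prop := ∀ (pattern : String) (number : Int), Dom_generate_seqs pattern number → Spec_generate_seqs pattern number (generate_seqs pattern number)

-- ===== LEMMAS AND PROOFS =====

theorem pvStrMul_toList (pattern : String) (n : Int) :
    (pvStrMul pattern n).toList = (List.replicate n.toNat pattern.toList).flatten := by
  simp [pvStrMul]

theorem pv_loop_eq (pattern : String) (n : ℕ) : ∀ (a b : Int), 0 ≤ a → a ≤ b → (b - a).toNat = n →
    (PySem.List.pyRange a b 1).foldl
      (fun seq_list i =>
        if i == 0 then seq_list ++ [pattern]
        else seq_list ++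
          [String.ofList (pattern.toList ++ ((PySem.List.pyGet? seq_list (i - 1)).getD "").toList)])
      ((PySem.List.pyRange 0 a 1).map (fun i => pvStrMul pattern (i + 1)))
    = (PySem.List.pyRange 0 b 1).map (fun i => pvStrMul pattern (i + 1)) := by
  induction n with
  | zero =>
    intro a b ha hab hn
    have hba : b ≤ a := by omega
    have hab' : a = b := le_antisymm hab hba
    rw [PySem.List.pyRange_one_eq_nil hba, hab']
    rfl
  | succ n ih =>
    intro a b ha hab hn
    have hlt : a < b := by omega
    rw [PySem.List.pyRange_one_cons hlt]
    simp only [List.foldl_cons]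
    have hstep :
        (if a == 0 then ((PySem.List.pyRange 0 a 1).map (fun i => pvStrMul pattern (i + 1))) ++ [pattern]
         else ((PySem.List.pyRange 0 a 1).map (fun i => pvStrMul pattern (i + 1))) ++
           [String.ofList (pattern.toList ++
             ((PySem.List.pyGet? ((PySem.List.pyRange 0 a 1).map (fun i => pvStrMul pattern (i + 1))) (a - 1)).getD "").toList)])
        = (PySem.List.pyRange 0 (a + 1) 1).map (fun i => pvStrMul pattern (i + 1)) := by
      rw [PySem.List.pyRange_one_succ_right ha, List.map_append]
      by_cases h0 : a = 0
      · subst h0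
        simp only [beq_self_eq_true, if_pos]
        rw [PySem.List.pyRange_one_eq_nil le_rfl]
        simp [pvStrMul]
      · have hpos : 0 < a := lt_of_le_of_ne ha (Ne.symm h0)
        have hbeq : (a == 0) = false := by simp [h0]
        rw [hbeq]
        simp only [Bool.false_eq_true, if_false, List.append_cancel_left_eq]
        have hidx : a - 1 = ((a - 1).toNat : Int) := by omega
        rw [hidx, PySem.List.pyGet?_natCast]
        have hk : (a - 1).toNat < (PySem.List.pyRange 0 a 1).length := by
          rw [PySem.List.length_pyRange_one]; omega
        rw [List.getElem?_map, List.getElem?_eq_getElem hk]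
        rw [PySem.List.getElem_pyRange_one]
        simp only [Option.map_some, Option.getD_some]
        have hia : ((0 : Int) + ((a - 1).toNat : Int)) + 1 = a := by omega
        rw [hia]
        congr 1
        rw [pvStrMul_toList]
        have h1 : (a + 1).toNat = a.toNat + 1 := by omega
        simp only [pvStrMul, h1, List.replicate_succ, List.flatten_cons]
    rw [hstep]
    exact ih (a + 1) b (by omega) (by omega) (by omega)

-- ===== VERDICT (by name: the statement is the Claim_ definition above) =====
theorem generate_seqs_spec : Claim_equal_generate_seqs := by
  intro pattern number _
  unfold Spec_generate_seqs generate_seqs generate_seqs_alt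
  by_cases h : 0 ≤ number
  · have := pv_loop_eq pattern (number - 0).toNat 0 number le_rfl h rfl
    rw [PySem.List.pyRange_one_eq_nil le_rfl] at this
    simpa using this
  · rw [PySem.List.pyRange_one_eq_nil (by omega)]
    rfl
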